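-- pv_equiv track=rewrite | github.com/BrunoV21/FitOps-CLI | fitops/workouts/segments.py | _infer_step_type
-- ===== SOURCE A (Python) =====
-- def _infer_step_type(heading: str) -> str:
--     h = heading.lower()
--     if any(w in h for w in ("warm",)):
--         return "warmup"
--     if any(w in h for w in ("cool",)):
--         return "cooldown"
--     if any(w in h for w in ("recovery", "rest", "jog", "walk")):
--         return "recovery"
--     if any(
--         w in h
--         for w in ("interval", "rep", "set", "effort", "hard", "threshold", "main")
--     ):
--         return "interval"
--     return "main"
-- ===== SOURCE B (Python) =====
-- KEYWORD_LABEL = {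
--     "warm": "warmup",
--     "cool": "cooldown",
--     "recovery": "recovery",
--     "rest": "recovery",
--     "jog": "recovery",
--     "walk": "recovery",
--     "interval": "interval",
--     "rep": "interval",
--     "set": "interval",
--     "effort": "interval",
--     "hard": "interval",
--     "threshold": "interval",
--     "main": "interval",
-- }
--
-- PRIORITY = ["warmup", "cooldown", "recovery", "interval"]
--
--
-- def _infer_step_type(heading: str) -> str:
--     h = heading.lower()
--     # Stage 1: collect EVERY label whose keyword occurs somewhere in the heading.
--     matched = {label for kw, label in KEYWORD_LABEL.items() if kw in h}
--     # Stage 2: resolve conflicts by fixed priority; default when nothing matched.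
--     return next((label for label in PRIORITY if label in matched), "main")
-- ===== Notes on version B (the rewrite author's own statement) =====
-- stated objective: alternative
-- what changed: Instead of an ordered early-return if/any chain, B first collects the full set of matched labels from a flat keyword-to-label map in one stage, then resolves the winner in a second stage by a fixed priority list; this is correct because the priority order equals A's check order.
import Mathlib
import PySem

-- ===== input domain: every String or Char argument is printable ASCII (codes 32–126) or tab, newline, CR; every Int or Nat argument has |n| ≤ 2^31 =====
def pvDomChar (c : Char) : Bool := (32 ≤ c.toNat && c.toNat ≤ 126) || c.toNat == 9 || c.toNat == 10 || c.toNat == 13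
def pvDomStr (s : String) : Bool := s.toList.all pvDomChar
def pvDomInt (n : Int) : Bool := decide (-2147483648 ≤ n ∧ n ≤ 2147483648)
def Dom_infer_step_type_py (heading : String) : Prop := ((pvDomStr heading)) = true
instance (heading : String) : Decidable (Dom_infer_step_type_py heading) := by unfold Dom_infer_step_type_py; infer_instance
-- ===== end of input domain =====

-- B replaces A's ordered early-return if/any chain by two stages: collect all matched
-- labels from a flat keyword→label map, then pick the winner by a fixed priority list.

-- ===== PORT A =====
def infer_step_type_py (heading : String) : String :=
  let h := PySem.Str.lower heading
  if ["warm"].any (fun w => PySem.Str.isIn w h) then "warmup"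
  else if ["cool"].any (fun w => PySem.Str.isIn w h) then "cooldown"
  else if ["recovery", "rest", "jog", "walk"].any (fun w => PySem.Str.isIn w h) then "recovery"
  else if ["interval", "rep", "set", "effort", "hard", "threshold", "main"].any
      (fun w => PySem.Str.isIn w h) then "interval"
  else "main"

-- ===== PORT B =====
def pvKeywordLabel : List (String × String) :=
  [("warm", "warmup"), ("cool", "cooldown"),
   ("recovery", "recovery"), ("rest", "recovery"), ("jog", "recovery"), ("walk", "recovery"),
   ("interval", "interval"), ("rep", "interval"), ("set", "interval"), ("effort", "interval"),
   ("hard", "interval"), ("threshold", "interval"), ("main", "interval")]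

def pvPriority : List String := ["warmup", "cooldown", "recovery", "interval"]

def infer_step_type_py_alt (heading : String) : String :=
  let h := PySem.Str.lower heading
  -- Stage 1: set comprehension over the keyword→label map
  let matched : PySem.Set String :=
    PySem.Set.ofList ((pvKeywordLabel.filter (fun p => PySem.Str.isIn p.1 h)).map Prod.snd)
  -- Stage 2: first priority label contained in matched, default "main"
  (pvPriority.find? (fun label => PySem.Set.contains matched label)).getD "main"

-- ===== PRECONDITION & SPEC =====
def Spec_infer_step_type_py (heading : String) (out : String) : Prop := out = infer_step_type_py_alt heading
instance (heading : String) (out : String) : Decidable (Spec_infer_step_type_py heading out) := by unfold Spec_infer_step_type_py; infer_instance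

-- ===== CLAIM (what is proved, stated in full; the proofs are below) =====
def Claim_equal_infer_step_type_py : Prop := ∀ (heading : String), Dom_infer_step_type_py heading → Spec_infer_step_type_py heading (infer_step_type_py heading)

-- ===== LEMMAS AND PROOFS =====
theorem pv_contains_matched (h x : String) :
    PySem.Set.contains
      (PySem.Set.ofList ((pvKeywordLabel.filter (fun p => PySem.Str.isIn p.1 h)).map Prod.snd)) x
    = pvKeywordLabel.any (fun p => PySem.Str.isIn p.1 h && p.2 == x) := by
  rw [Bool.eq_iff_iff]
  simp only [PySem.Set.contains_iff, PySem.Set.mem_ofList, List.mem_map, List.mem_filter,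
    List.any_eq_true, Bool.and_eq_true, beq_iff_eq]
  constructor
  · rintro ⟨p, ⟨hp, hf⟩, hx⟩; exact ⟨p, hp, hf, by simp [hx]⟩
  · rintro ⟨p, hp, hf, hx⟩; exact ⟨p, ⟨hp, hf⟩, by simpa using hx⟩

theorem pv_eq (h : String) : infer_step_type_py_alt h = infer_step_type_py h := by
  unfold infer_step_type_py infer_step_type_py_alt
  simp only [pv_contains_matched]
  unfold pvKeywordLabel pvPriority
  simp only [List.any_cons, List.any_nil, Bool.or_false]
  cases PySem.Str.isIn "warm" (PySem.Str.lower h) <;>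
  cases PySem.Str.isIn "cool" (PySem.Str.lower h) <;>
  cases hg3 : (PySem.Str.isIn "recovery" (PySem.Str.lower h) ||
      (PySem.Str.isIn "rest" (PySem.Str.lower h) ||
      (PySem.Str.isIn "jog" (PySem.Str.lower h) ||
      PySem.Str.isIn "walk" (PySem.Str.lower h)))) <;>
  cases hg4 : (PySem.Str.isIn "interval" (PySem.Str.lower h) ||
      (PySem.Str.isIn "rep" (PySem.Str.lower h) ||
      (PySem.Str.isIn "set" (PySem.Str.lower h) ||
      (PySem.Str.isIn "effort" (PySem.Str.lower h) ||
      (PySem.Str.isIn "hard" (PySem.Str.lower h) ||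
      (PySem.Str.isIn "threshold" (PySem.Str.lower h) ||
      PySem.Str.isIn "main" (PySem.Str.lower h))))))) <;>
  simp_all

-- ===== VERDICT (by name: the statement is the Claim_ definition above) =====
theorem infer_step_type_py_spec : Claim_equal_infer_step_type_py := by
  intro heading _
  unfold Spec_infer_step_type_py
  exact (pv_eq heading).symm
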